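-- pv_equiv track=rewrite | github.com/MaTriXy/MotionEyes | skill/motioneyes-visual-analysis/scripts/analyze_sequence.py | pick_keyframes
-- ===== SOURCE A (Python) =====
-- def pick_keyframes(frame_count, diff_scores):
--     if frame_count <= 3:
--         return list(range(frame_count))
--     start = 0
--     mid = frame_count // 2
--     end = frame_count - 1
--     top_pairs = sorted(range(len(diff_scores)), key=lambda i: diff_scores[i], reverse=True)[:2]
--     top_frames = [min(frame_count - 1, i + 1) for i in top_pairs]
--     keyframes = [start, mid, end] + top_frames
--     return sorted(set(keyframes))
-- ===== SOURCE B (Python) =====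
-- def pick_keyframes(frame_count, diff_scores):
--     if frame_count <= 3:
--         return list(range(frame_count))
--     best = None
--     second = None
--     for i, s in enumerate(diff_scores):
--         if best is None or s > best[0]:
--             best, second = (s, i), best
--         elif second is None or s > second[0]:
--             second = (s, i)
--     keyframes = [0, frame_count // 2, frame_count - 1]
--     for pair in (best, second):
--         if pair is not None:
--             keyframes.append(min(frame_count - 1, pair[1] + 1))
--     return sorted(set(keyframes))
-- ===== Notes on version B (the rewrite author's own statement) =====
-- stated objective: faster
-- what changed: Replaces A's stable descending sort of all indices (then taking the first two) with a single linear pass that tracks the best and second-best (score, index) pairs, ties keeping the lower index.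
import Mathlib
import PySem

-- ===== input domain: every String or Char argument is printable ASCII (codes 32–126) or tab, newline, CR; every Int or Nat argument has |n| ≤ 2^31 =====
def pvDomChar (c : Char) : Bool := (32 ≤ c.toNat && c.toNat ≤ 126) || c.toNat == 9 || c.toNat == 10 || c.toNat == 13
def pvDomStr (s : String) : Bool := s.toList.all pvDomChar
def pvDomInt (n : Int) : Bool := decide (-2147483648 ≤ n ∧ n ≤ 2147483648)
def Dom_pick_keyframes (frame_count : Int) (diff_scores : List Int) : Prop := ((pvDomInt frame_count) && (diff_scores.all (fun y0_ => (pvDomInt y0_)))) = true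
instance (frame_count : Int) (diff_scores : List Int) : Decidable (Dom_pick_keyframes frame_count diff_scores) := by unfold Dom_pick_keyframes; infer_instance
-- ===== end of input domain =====

-- B replaces A's full stable sort of all indices with a single linear pass tracking the top-2 scores (objective: faster).

-- ===== PORT A =====
def pick_keyframes (frame_count : Int) (diff_scores : List Int) : List Int :=
  if frame_count ≤ 3 then PySem.List.pyRange 0 frame_count 1
  else
    let start : Int := 0
    let mid := PySem.Int.floordiv frame_count 2
    let fin := frame_count - 1
    -- key lambda i: diff_scores[i]: every i drawn from range(len(diff_scores)) is in range, so pyGetD … 0 is exact here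
    let top_pairs := PySem.List.slice
      (PySem.List.sorted (PySem.List.pyRange 0 (PySem.List.len diff_scores) 1)
        (fun i => PySem.List.pyGetD diff_scores i 0) true) none (some 2)
    let top_frames := top_pairs.map (fun i => min (frame_count - 1) (i + 1))
    let keyframes := [start, mid, fin] ++ top_frames
    PySem.List.sorted (PySem.Set.ofList keyframes) (fun x => x) false

-- ===== PORT B =====
-- one loop step of Source B: state (best, second), each an optional (score, index); p = (index, score) from enumerate
def pkStep (st : Option (Int × Int) × Option (Int × Int)) (p : Int × Int) :
    Option (Int × Int) × Option (Int × Int) :=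
  match st.1 with
  | none => (some (p.2, p.1), st.1)
  | some b =>
    if b.1 < p.2 then (some (p.2, p.1), st.1)
    else
      match st.2 with
      | none => (st.1, some (p.2, p.1))
      | some s2 => if s2.1 < p.2 then (st.1, some (p.2, p.1)) else st

def pick_keyframes_alt (frame_count : Int) (diff_scores : List Int) : List Int :=
  if frame_count ≤ 3 then PySem.List.pyRange 0 frame_count 1
  else
    let bs := (PySem.List.enumerate diff_scores 0).foldl pkStep (none, none)
    let k1 : List Int := [0, PySem.Int.floordiv frame_count 2, frame_count - 1]
    let k2 := match bs.1 with
      | none => k1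
      | some b => k1 ++ [min (frame_count - 1) (b.2 + 1)]
    let k3 := match bs.2 with
      | none => k2
      | some s => k2 ++ [min (frame_count - 1) (s.2 + 1)]
    PySem.List.sorted (PySem.Set.ofList k3) (fun x => x) false

-- ===== PRECONDITION & SPEC =====
def Spec_pick_keyframes (frame_count : Int) (diff_scores : List Int) (out : List Int) : Prop := out = pick_keyframes_alt frame_count diff_scores
instance (frame_count : Int) (diff_scores : List Int) (out : List Int) : Decidable (Spec_pick_keyframes frame_count diff_scores out) := by unfold Spec_pick_keyframes; infer_instance

-- ===== CLAIM (what is proved, stated in full; the proofs are below) =====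
def Claim_equal_pick_keyframes : Prop := ∀ (frame_count : Int) (diff_scores : List Int), Dom_pick_keyframes frame_count diff_scores → Spec_pick_keyframes frame_count diff_scores (pick_keyframes frame_count diff_scores)

-- ===== LEMMAS AND PROOFS =====

-- the first two entries of an insertion step depend only on the first two entries of the accumulator
def pkAStep (be : Int → Int → Bool) (st : List Int) (x : Int) : List Int :=
  match st with
  | [] => [x]
  | [a] => if be x a then [x, a] else [a, x]
  | a :: b :: _ => if be x a then [x, a] else if be x b then [a, x] else [a, b]

theorem take2_insertBy (be : Int → Int → Bool) (x : Int) (acc : List Int) :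
    (PySem.List.insertBy be x acc).take 2 = pkAStep be (acc.take 2) x := by
  match acc with
  | [] => simp [PySem.List.insertBy, pkAStep]
  | [a] =>
    by_cases hb : be x a
    · simp [PySem.List.insertBy, pkAStep, hb]
    · simp [PySem.List.insertBy, pkAStep, hb]
  | a :: b :: t =>
    by_cases hb : be x a
    · simp [PySem.List.insertBy, pkAStep, hb]
    · by_cases hb2 : be x b
      · simp [PySem.List.insertBy, pkAStep, hb, hb2]
      · simp [PySem.List.insertBy, pkAStep, hb, hb2]

theorem take2_foldl_insertBy (be : Int → Int → Bool) (xs : List Int) :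
    ∀ acc, (xs.foldl (fun acc x => PySem.List.insertBy be x acc) acc).take 2
      = xs.foldl (pkAStep be) (acc.take 2) := by
  induction xs with
  | nil => intro acc; rfl
  | cons x xs ih =>
    intro acc
    simp only [List.foldl_cons]
    rw [ih, take2_insertBy]

-- correspondence between B's (best, second) state and the first two indices of A's descending sort
def pkRel (key : Int → Int) (stB : Option (Int × Int) × Option (Int × Int)) (stA : List Int) : Prop :=
  match stB with
  | (none, none) => stA = []
  | (some b, none) => stA = [b.2] ∧ key b.2 = b.1
  | (some b, some s) => stA = [b.2, s.2] ∧ key b.2 = b.1 ∧ key s.2 = s.1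
  | (none, some _) => False

theorem pkFold (key : Int → Int) (xs : List Int) :
    ∀ stB stA, pkRel key stB stA →
      pkRel key (xs.foldl (fun st i => pkStep st (i, key i)) stB)
        (xs.foldl (pkAStep (fun a b => decide (key b < key a))) stA) := by
  induction xs with
  | nil => intro stB stA h; exact h
  | cons x xs ih =>
    intro stB stA h
    simp only [List.foldl_cons]
    apply ih
    rcases stB with ⟨best, second⟩
    match best, second with
    | none, none =>
      simp only [pkRel] at h; subst h
      simp [pkStep, pkAStep, pkRel]
    | none, some s => exact absurd h (by simp [pkRel])
    | some b, none =>
      obtain ⟨hA, hk⟩ := h; subst hA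
      by_cases hc : b.1 < key x
      · simp [pkStep, pkAStep, pkRel, hc, hk]
      · simp [pkStep, pkAStep, pkRel, hc, hk]
    | some b, some s =>
      obtain ⟨hA, hkb, hks⟩ := h; subst hA
      by_cases hc : b.1 < key x
      · simp [pkStep, pkAStep, pkRel, hc, hkb]
      · by_cases hc2 : s.1 < key x
        · simp [pkStep, pkAStep, pkRel, hc, hc2, hkb, hks]
        · simp [pkStep, pkAStep, pkRel, hc, hc2, hkb, hks]

-- ===== VERDICT (by name: the statement is the Claim_ definition above) =====
theorem pick_keyframes_spec : Claim_equal_pick_keyframes := by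
  intro fc ds _
  unfold Spec_pick_keyframes pick_keyframes pick_keyframes_alt
  by_cases h : fc ≤ 3
  · simp [h]
  · simp only [h, if_false]
    set key : Int → Int := fun i => PySem.List.pyGetD ds i 0 with hkey
    have hB : (PySem.List.enumerate ds 0).foldl pkStep (none, none)
        = (PySem.List.pyRange 0 (PySem.List.len ds) 1).foldl
            (fun st i => pkStep st (i, key i)) (none, none) := by
      rw [PySem.List.enumerate_eq_map_pyRange ds 0, List.foldl_map]
    have hA : PySem.List.slice
        (PySem.List.sorted (PySem.List.pyRange 0 (PySem.List.len ds) 1) key true) none (some 2)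
        = (PySem.List.pyRange 0 (PySem.List.len ds) 1).foldl
            (pkAStep (fun a b => decide (key b < key a))) [] := by
      rw [PySem.List.sorted_rev_eq_foldl_insertBy]
      have h2 := PySem.List.slice_to_natCast
        ((PySem.List.pyRange 0 (PySem.List.len ds) 1).foldl
          (fun acc x => PySem.List.insertBy (fun a b => decide (key b < key a)) x acc) []) 2
      rw [show ((2 : Nat) : Int) = (2 : Int) by norm_num] at h2
      rw [h2, take2_foldl_insertBy]
      rfl
    have hrel := pkFold key (PySem.List.pyRange 0 (PySem.List.len ds) 1) (none, none) []
      (by simp [pkRel])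
    set stB := (PySem.List.pyRange 0 (PySem.List.len ds) 1).foldl
      (fun st i => pkStep st (i, key i)) (none, none) with hstB
    set stA := (PySem.List.pyRange 0 (PySem.List.len ds) 1).foldl
      (pkAStep (fun a b => decide (key b < key a))) [] with hstA
    simp only [hB, hA]
    rcases stB with ⟨best, second⟩
    match best, second with
    | none, none =>
      simp only [pkRel] at hrel
      rw [hrel]
      simp
    | none, some s => exact absurd hrel (by simp [pkRel])
    | some b, none =>
      obtain ⟨hAeq, _⟩ := hrel
      rw [hAeq]
      simp
    | some b, some s =>
      obtain ⟨hAeq, _, _⟩ := hrel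
      rw [hAeq]
      simp
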